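-- pv_equiv track=rewrite | github.com/MateoPissarello/Buffalo | analizador_sintactico.py | split_line_into_tokens
-- ===== SOURCE A (Python) =====
-- SYMBOLS = {
--     "(": "tk_par_izq",
--     ")": "tk_par_der",
--     ":": "tk_dos_puntos",
--     "=": "tk_asig",
--     ".": "tk_punto",
--     "!=": "tk_distinto",
--     "+": "tk_suma",
--     "-": "tk_resta",
--     "*": "tk_multiplicacion",
--     "/": "tk_division",
--     ",": "tk_coma",
--     "^": "tk_potencia",
--     "[": "tk_cor_izq",
--     "]": "tk_cor_der",
--     "{": "tk_llave_izq",
--     "}": "tk_llave_der",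
--     "<": "tk_menor",
--     ">": "tk_mayor",
--     "<=": "tk_menor_igual",
--     ">=": "tk_mayor_igual",
--     "==": "tk_igual",
--     "%": "tk_modulo",
-- }
--
-- def split_line_into_tokens(line, col_num):
--     tokens = []
--     current_token = ""
--     i = 0
--     while i < len(line):
--         char = line[i]
--         if char.isspace():
--             if current_token:
--                 tokens.append((current_token, col_num - len(current_token)))
--                 current_token = ""
--             i += 1
--             col_num += 1
--             continue
--         if i < len(line) - 1 and line[i : i + 2] in SYMBOLS:
--             if current_token:
--                 tokens.append((current_token, col_num - len(current_token)))
--                 current_token = ""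
--             tokens.append((line[i : i + 2], col_num))
--             i += 2
--             col_num += 2
--             continue
--         if char in SYMBOLS:
--             if current_token:
--                 tokens.append((current_token, col_num - len(current_token)))
--                 current_token = ""
--             tokens.append((char, col_num))
--             i += 1
--             col_num += 1
--             continue
--         current_token += char
--         i += 1
--         col_num += 1
--     if current_token:
--         tokens.append((current_token, col_num - len(current_token)))
--     return tokens
-- ===== SOURCE B (Python) =====
-- SYMBOLS = {
--     "(": "tk_par_izq",
--     ")": "tk_par_der",
--     ":": "tk_dos_puntos",
--     "=": "tk_asig",
--     ".": "tk_punto",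
--     "!=": "tk_distinto",
--     "+": "tk_suma",
--     "-": "tk_resta",
--     "*": "tk_multiplicacion",
--     "/": "tk_division",
--     ",": "tk_coma",
--     "^": "tk_potencia",
--     "[": "tk_cor_izq",
--     "]": "tk_cor_der",
--     "{": "tk_llave_izq",
--     "}": "tk_llave_der",
--     "<": "tk_menor",
--     ">": "tk_mayor",
--     "<=": "tk_menor_igual",
--     ">=": "tk_mayor_igual",
--     "==": "tk_igual",
--     "%": "tk_modulo",
-- }
--
--
-- def split_line_into_tokens(line, col_num):
--     # Maximal-run scanner: no accumulator, columns computed as col_num + index.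
--     tokens = []
--     n = len(line)
--     i = 0
--     while i < n:
--         ch = line[i]
--         if ch.isspace():
--             i += 1
--         elif i + 1 < n and line[i:i + 2] in SYMBOLS:
--             tokens.append((line[i:i + 2], col_num + i))
--             i += 2
--         elif ch in SYMBOLS:
--             tokens.append((ch, col_num + i))
--             i += 1
--         else:
--             j = i + 1
--             while j < n and not (line[j].isspace() or line[j] in SYMBOLS
--                                  or (j + 1 < n and line[j:j + 2] in SYMBOLS)):
--                 j += 1
--             tokens.append((line[i:j], col_num + i))
--             i = j
--     return tokens
-- ===== Notes on version B (the rewrite author's own statement) =====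
-- stated objective: simpler
-- what changed: Replaced A's character-by-character accumulator loop (mutable current_token with four flush sites) by a maximal-run scanner that skips whitespace, emits symbol tokens directly, and slices each whole identifier run in one inner scan, computing every column as col_num + index instead of mutating col_num.
import Mathlib
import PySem

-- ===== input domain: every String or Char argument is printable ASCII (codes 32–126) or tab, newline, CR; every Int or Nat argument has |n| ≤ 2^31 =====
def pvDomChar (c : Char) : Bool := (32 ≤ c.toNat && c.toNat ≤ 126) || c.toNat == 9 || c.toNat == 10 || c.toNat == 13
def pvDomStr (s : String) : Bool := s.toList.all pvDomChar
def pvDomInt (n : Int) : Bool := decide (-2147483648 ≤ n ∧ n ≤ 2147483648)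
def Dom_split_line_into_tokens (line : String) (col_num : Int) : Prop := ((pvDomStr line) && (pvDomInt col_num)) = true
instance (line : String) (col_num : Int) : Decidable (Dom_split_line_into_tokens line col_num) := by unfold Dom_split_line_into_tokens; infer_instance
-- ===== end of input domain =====

-- B replaces A's character-accumulator loop by a maximal-run scanner that slices whole
-- identifier tokens and computes each column as col_num + index (objective: simpler).

-- the keys of SYMBOLS, in dict order (only key membership is ever used)
def pvSymbols : List String :=
  ["(", ")", ":", "=", ".", "!=", "+", "-", "*", "/", ",", "^",
   "[", "]", "{", "}", "<", ">", "<=", ">=", "==", "%"]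

def pvIsSym (s : String) : Bool := pvSymbols.contains s

-- ===== PORT A =====
-- state: remaining chars, col_num, current_token, tokens
def pvGoA : List Char → Int → List Char → List (String × Int) → List (String × Int)
  | [], col, cur, toks =>
      if cur.isEmpty then toks else toks ++ [(String.ofList cur, col - cur.length)]
  | c :: d :: rest2, col, cur, toks =>
      if PySem.Chars.isspace c then
        pvGoA (d :: rest2) (col + 1) []
          (if cur.isEmpty then toks else toks ++ [(String.ofList cur, col - cur.length)])
      else if pvIsSym (String.ofList [c, d]) then
        pvGoA rest2 (col + 2) []
          ((if cur.isEmpty then toks else toks ++ [(String.ofList cur, col - cur.length)])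
             ++ [(String.ofList [c, d], col)])
      else if pvIsSym (String.ofList [c]) then
        pvGoA (d :: rest2) (col + 1) []
          ((if cur.isEmpty then toks else toks ++ [(String.ofList cur, col - cur.length)])
             ++ [(String.ofList [c], col)])
      else
        pvGoA (d :: rest2) (col + 1) (cur ++ [c]) toks
  | [c], col, cur, toks =>
      if PySem.Chars.isspace c then
        pvGoA [] (col + 1) []
          (if cur.isEmpty then toks else toks ++ [(String.ofList cur, col - cur.length)])
      else if pvIsSym (String.ofList [c]) then
        pvGoA [] (col + 1) []
          ((if cur.isEmpty then toks else toks ++ [(String.ofList cur, col - cur.length)])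
             ++ [(String.ofList [c], col)])
      else
        pvGoA [] (col + 1) (cur ++ [c]) toks
  termination_by l _ _ _ => l.length
  decreasing_by all_goals simp

def split_line_into_tokens (line : String) (col_num : Int) : List (String × Int) :=
  pvGoA line.toList col_num [] []

-- ===== PORT B =====
-- condition of B's inner while loop (token-break test at a position)
def pvIsBreak (c : Char) (rest : List Char) : Bool :=
  PySem.Chars.isspace c || pvIsSym (String.ofList [c]) ||
    (match rest with | d :: _ => pvIsSym (String.ofList [c, d]) | [] => false)

-- number of further characters B's inner while loop walks past
def pvRunLen : List Char → Nat
  | [] => 0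
  | c :: rest => if pvIsBreak c rest then 0 else pvRunLen rest + 1

def pvGoB : List Char → Int → List (String × Int)
  | [], _ => []
  | c :: d :: rest2, col =>
      if PySem.Chars.isspace c then pvGoB (d :: rest2) (col + 1)
      else if pvIsSym (String.ofList [c, d]) then
        (String.ofList [c, d], col) :: pvGoB rest2 (col + 2)
      else if pvIsSym (String.ofList [c]) then
        (String.ofList [c], col) :: pvGoB (d :: rest2) (col + 1)
      else
        let k := pvRunLen (d :: rest2)
        (String.ofList (c :: (d :: rest2).take k), col) ::
          pvGoB ((d :: rest2).drop k) (col + 1 + k)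
  | [c], col =>
      if PySem.Chars.isspace c then []
      else if pvIsSym (String.ofList [c]) then [(String.ofList [c], col)]
      else [(String.ofList [c], col)]
  termination_by l _ => l.length
  decreasing_by all_goals (simp [List.length_drop]; try omega)

def split_line_into_tokens_alt (line : String) (col_num : Int) : List (String × Int) :=
  pvGoB line.toList col_num

-- ===== PRECONDITION & SPEC =====
def Spec_split_line_into_tokens (line : String) (col_num : Int) (out : List (String × Int)) : Prop := out = split_line_into_tokens_alt line col_num
instance (line : String) (col_num : Int) (out : List (String × Int)) : Decidable (Spec_split_line_into_tokens line col_num out) := by unfold Spec_split_line_into_tokens; infer_instance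

-- ===== CLAIM (what is proved, stated in full; the proofs are below) =====
def Claim_equal_split_line_into_tokens : Prop := ∀ (line : String) (col_num : Int), Dom_split_line_into_tokens line col_num → Spec_split_line_into_tokens line col_num (split_line_into_tokens line col_num)

-- ===== LEMMAS AND PROOFS =====

theorem pv_main : ∀ (n : Nat) (l : List Char), l.length ≤ n → ∀ (col : Int) (toks : List (String × Int)),
    (pvGoA l col [] toks = toks ++ pvGoB l col) ∧
    (∀ cur : List Char, cur ≠ [] →
      pvGoA l col cur toks =
        toks ++ (String.ofList (cur ++ l.take (pvRunLen l)), col - cur.length) ::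
          pvGoB (l.drop (pvRunLen l)) (col + pvRunLen l)) := by
  intro n
  induction n with
  | zero =>
    intro l hl col toks
    have hl0 : l = [] := by cases l <;> simp_all
    subst hl0
    refine ⟨by simp [pvGoA, pvGoB], ?_⟩
    intro cur hcur
    simp [pvGoA, pvGoB, pvRunLen, List.isEmpty_iff, hcur]
  | succ m ih =>
    intro l hl col toks
    match l with
    | [] =>
      refine ⟨by simp [pvGoA, pvGoB], ?_⟩
      intro cur hcur
      simp [pvGoA, pvGoB, pvRunLen, List.isEmpty_iff, hcur]
    | [c] =>
      by_cases hs : PySem.Chars.isspace c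
      · refine ⟨by simp [pvGoA, pvGoB, hs], ?_⟩
        intro cur hcur
        simp [pvGoA, pvGoB, pvRunLen, pvIsBreak, hs, List.isEmpty_iff, hcur]
      · by_cases h1 : pvIsSym (String.ofList [c])
        · refine ⟨by simp [pvGoA, pvGoB, hs, h1], ?_⟩
          intro cur hcur
          simp [pvGoA, pvGoB, pvRunLen, pvIsBreak, hs, h1, List.isEmpty_iff, hcur]
        · refine ⟨?_, ?_⟩
          · simp [pvGoA, pvGoB, hs, h1]
          · intro cur hcur
            simp [pvGoA, pvGoB, pvRunLen, pvIsBreak, hs, h1, List.isEmpty_iff, hcur]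
    | c :: d :: rest2 =>
      have hrest : (d :: rest2).length ≤ m := by simp at hl ⊢; omega
      have hrest2 : rest2.length ≤ m := by simp at hl ⊢; omega
      by_cases hs : PySem.Chars.isspace c
      · refine ⟨?_, ?_⟩
        · simp only [pvGoA, pvGoB, hs, if_pos, List.isEmpty_nil]
          exact (ih _ hrest _ _).1
        · intro cur hcur
          have hA : pvGoA (c :: d :: rest2) col cur toks =
              pvGoA (d :: rest2) (col + 1) []
                (toks ++ [(String.ofList cur, col - cur.length)]) := by
            simp [pvGoA, hs, List.isEmpty_iff, hcur]
          rw [hA, (ih _ hrest _ _).1]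
          simp [pvGoB, pvRunLen, pvIsBreak, hs]
      · by_cases hp : pvIsSym (String.ofList [c, d])
        · refine ⟨?_, ?_⟩
          · have hA : pvGoA (c :: d :: rest2) col [] toks =
                pvGoA rest2 (col + 2) [] (toks ++ [(String.ofList [c, d], col)]) := by
              simp [pvGoA, hs, hp]
            rw [hA, (ih _ hrest2 _ _).1]
            simp [pvGoB, hs, hp]
          · intro cur hcur
            have hA : pvGoA (c :: d :: rest2) col cur toks =
                pvGoA rest2 (col + 2) []
                  (toks ++ [(String.ofList cur, col - cur.length), (String.ofList [c, d], col)]) := by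
              simp [pvGoA, hs, hp, List.isEmpty_iff, hcur]
            rw [hA, (ih _ hrest2 _ _).1]
            simp [pvGoB, pvRunLen, pvIsBreak, hs, hp]
        · by_cases h1 : pvIsSym (String.ofList [c])
          · refine ⟨?_, ?_⟩
            · have hA : pvGoA (c :: d :: rest2) col [] toks =
                  pvGoA (d :: rest2) (col + 1) [] (toks ++ [(String.ofList [c], col)]) := by
                simp [pvGoA, hs, hp, h1]
              rw [hA, (ih _ hrest _ _).1]
              simp [pvGoB, hs, hp, h1]
            · intro cur hcur
              have hA : pvGoA (c :: d :: rest2) col cur toks =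
                  pvGoA (d :: rest2) (col + 1) []
                    (toks ++ [(String.ofList cur, col - cur.length), (String.ofList [c], col)]) := by
                simp [pvGoA, hs, hp, h1, List.isEmpty_iff, hcur]
              rw [hA, (ih _ hrest _ _).1]
              simp [pvGoB, pvRunLen, pvIsBreak, hs, hp, h1]
          · have hnb : pvIsBreak c (d :: rest2) = false := by
              simp [pvIsBreak, hs, hp, h1]
            refine ⟨?_, ?_⟩
            · have hA : pvGoA (c :: d :: rest2) col [] toks =
                  pvGoA (d :: rest2) (col + 1) [c] toks := by
                simp [pvGoA, hs, hp, h1]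
              rw [hA, (ih _ hrest _ _).2 [c] (by simp)]
              simp [pvGoB, hs, hp, h1, pvRunLen]
            · intro cur hcur
              have hA : pvGoA (c :: d :: rest2) col cur toks =
                  pvGoA (d :: rest2) (col + 1) (cur ++ [c]) toks := by
                simp [pvGoA, hs, hp, h1]
              rw [hA, (ih _ hrest _ _).2 (cur ++ [c]) (by simp)]
              simp [pvRunLen, hnb, List.append_assoc]
              congr 1
              split_ifs <;> ring

-- ===== VERDICT (by name: the statement is the Claim_ definition above) =====
theorem split_line_into_tokens_spec : Claim_equal_split_line_into_tokens := by
  intro line col _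
  unfold Spec_split_line_into_tokens split_line_into_tokens split_line_into_tokens_alt
  exact (pv_main line.toList.length line.toList le_rfl col []).1
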